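-- pv_equiv track=rewrite | github.com/pinobatch/bitmap-fonts | demowords.py | get_wordsbyscore
-- ===== SOURCE A (Python) =====
-- from collections import defaultdict
--
-- def get_wordsbyscore(wordlist, lettervalues):
--     wordsbyscore = defaultdict(set)
--     maxscore = 0
--     for word in wordlist:
--         word = word.strip()
--         wordchars = set(word)
--         score = sum(row[1] for row in lettervalues if row[0] in wordchars)
--         wordsbyscore[score].add(word)
--     return wordsbyscore
-- ===== SOURCE B (Python) =====
-- from collections import defaultdict
--
-- def get_wordsbyscore(wordlist, lettervalues):
--     # Pass 1: accumulate a letter -> summed value table.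
--     val = {}
--     for k, v in lettervalues:
--         val[k] = val.get(k, 0) + v
--     # Pass 2: score every stripped word via table lookups over its distinct chars.
--     scored = [(sum(val.get(c, 0) for c in set(w)), w)
--               for w in (word.strip() for word in wordlist)]
--     # Pass 3: group the (score, word) pairs.
--     wordsbyscore = defaultdict(set)
--     for score, w in scored:
--         wordsbyscore[score].add(w)
--     return wordsbyscore
-- ===== Notes on version B (the rewrite author's own statement) =====
-- stated objective: faster
-- what changed: B is a three-stage pipeline: it builds a letter->value table once (accumulating duplicates), maps the word list to (score, word) pairs by table lookup over each word's distinct characters, and only then groups the pairs; A instead rescans the entire lettervalues list inside the word loop.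
import Mathlib
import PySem

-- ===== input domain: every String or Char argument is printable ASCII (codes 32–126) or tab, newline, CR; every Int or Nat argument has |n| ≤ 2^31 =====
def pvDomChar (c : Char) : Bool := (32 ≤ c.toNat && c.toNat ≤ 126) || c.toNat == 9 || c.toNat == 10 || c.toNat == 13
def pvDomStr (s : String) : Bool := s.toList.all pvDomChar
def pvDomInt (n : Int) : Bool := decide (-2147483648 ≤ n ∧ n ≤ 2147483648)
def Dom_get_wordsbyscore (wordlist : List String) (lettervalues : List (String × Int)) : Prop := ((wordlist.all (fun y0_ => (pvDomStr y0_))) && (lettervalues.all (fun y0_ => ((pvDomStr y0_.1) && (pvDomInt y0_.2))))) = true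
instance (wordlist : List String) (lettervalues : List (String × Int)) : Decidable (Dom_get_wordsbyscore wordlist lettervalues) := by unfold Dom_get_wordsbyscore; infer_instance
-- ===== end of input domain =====

-- B is a staged pipeline — build a letter->value table once, map words to (score, word) pairs
-- by table lookup over distinct characters, then group the pairs — instead of A's single loop
-- that rescans lettervalues for every word (faster in a timing run at the largest sizes).

-- iterating a Python str yields its 1-character strings; set(word) is a set of those
def pvStr1 (c : Char) : String := String.ofList [c]

-- ===== PORT A =====
def get_wordsbyscore (wordlist : List String) (lettervalues : List (String × Int)) : List (Int × List String) :=
  -- wordsbyscore = defaultdict(set); (maxscore = 0 is dead code in A)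
  (wordlist.foldl (fun d word =>
      let w := PySem.Str.strip word
      let wordchars : PySem.Set String := PySem.Set.ofList (w.toList.map pvStr1)
      let score : Int := ((lettervalues.filter (fun row => PySem.Set.contains wordchars row.1)).map (·.2)).sum
      d.modify score [] (fun s => PySem.Set.add s w))
    PySem.Dict.empty).items

-- ===== PORT B =====
def get_wordsbyscore_alt (wordlist : List String) (lettervalues : List (String × Int)) : List (Int × List String) :=
  -- pass 1: val[k] = val.get(k, 0) + v over the lettervalues rows
  let val : PySem.Dict String Int :=
    lettervalues.foldl (fun d row => d.insert row.1 (d.getD row.1 0 + row.2)) PySem.Dict.empty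
  -- pass 2: scored = [(sum(val.get(c, 0) for c in set(w)), w) for w in (word.strip() ...)]
  let scored : List (Int × String) :=
    (wordlist.map PySem.Str.strip).map (fun w =>
      (((PySem.Set.ofList (w.toList.map pvStr1)).map (fun c => val.getD c 0)).sum, w))
  -- pass 3: group the pairs into a defaultdict(set)
  (scored.foldl (fun d p => d.modify p.1 [] (fun s => PySem.Set.add s p.2)) PySem.Dict.empty).items

-- ===== PRECONDITION & SPEC =====
def Spec_get_wordsbyscore (wordlist : List String) (lettervalues : List (String × Int)) (out : List (Int × List String)) : Prop := out = get_wordsbyscore_alt wordlist lettervalues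
instance (wordlist : List String) (lettervalues : List (String × Int)) (out : List (Int × List String)) : Decidable (Spec_get_wordsbyscore wordlist lettervalues out) := by unfold Spec_get_wordsbyscore; infer_instance

-- ===== CLAIM (what is proved, stated in full; the proofs are below) =====
def Claim_equal_get_wordsbyscore : Prop := ∀ (wordlist : List String) (lettervalues : List (String × Int)), Dom_get_wordsbyscore wordlist lettervalues → Spec_get_wordsbyscore wordlist lettervalues (get_wordsbyscore wordlist lettervalues)

-- ===== LEMMAS AND PROOFS =====

-- the accumulated table looks up to the per-key sum of values
lemma val_getD (L : List (String × Int)) (d : PySem.Dict String Int) (k : String) :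
    (L.foldl (fun d row => d.insert row.1 (d.getD row.1 0 + row.2)) d).getD k 0
      = d.getD k 0 + ((L.filter (fun r => r.1 == k)).map (·.2)).sum := by
  induction L generalizing d with
  | nil => simp
  | cons r L ih =>
    simp only [List.foldl_cons, ih, List.filter_cons]
    rw [PySem.Dict.getD_insert]
    by_cases h : k = r.1
    · simp [h]; ring
    · simp [h, mt Eq.symm h]

lemma sum_map_zero (S : List String) (x : String) (h : x ∉ S) (v : Int) :
    (S.map (fun k => if x = k then v else 0)).sum = 0 := by
  induction S with
  | nil => simp
  | cons a S ih =>
    simp only [List.mem_cons, not_or] at h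
    simp [h.1, ih h.2]

lemma sum_indicator (S : List String) (hS : S.Nodup) (x : String) (v : Int) :
    (S.map (fun k => if x = k then v else 0)).sum = if x ∈ S then v else 0 := by
  induction S with
  | nil => simp
  | cons a S ih =>
    rcases List.nodup_cons.mp hS with ⟨ha, hS'⟩
    by_cases h : x = a
    · subst h; simp [sum_map_zero S x ha v]
    · simp [h, ih hS']

-- summing a word's distinct letters through the per-key table = one filtered pass over L
lemma sum_perkey (L : List (String × Int)) (S : List String) (hS : S.Nodup) :
    (S.map (fun k => ((L.filter (fun r => r.1 == k)).map (·.2)).sum)).sum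
      = ((L.filter (fun r => decide (r.1 ∈ S))).map (·.2)).sum := by
  induction L with
  | nil => simp
  | cons r L ih =>
    have step : ∀ k : String, (((r :: L).filter (fun r => r.1 == k)).map (·.2)).sum
        = (if r.1 = k then r.2 else 0) + ((L.filter (fun r => r.1 == k)).map (·.2)).sum := by
      intro k; by_cases h : r.1 = k <;> simp [h]
    have ind : (S.map (fun k => if r.1 = k then r.2 else 0)).sum = if r.1 ∈ S then r.2 else 0 :=
      sum_indicator S hS r.1 r.2
    calc (S.map (fun k => (((r :: L).filter (fun r => r.1 == k)).map (·.2)).sum)).sum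
        = (S.map (fun k => (if r.1 = k then r.2 else 0) + ((L.filter (fun r => r.1 == k)).map (·.2)).sum)).sum := by
          congr 1; exact List.map_congr_left (fun k _ => step k)
      _ = (S.map (fun k => if r.1 = k then r.2 else 0)).sum
            + (S.map (fun k => ((L.filter (fun r => r.1 == k)).map (·.2)).sum)).sum := by
          rw [← List.sum_map_add]
      _ = (((r :: L).filter (fun r => decide (r.1 ∈ S))).map (·.2)).sum := by
          rw [ind, ih, List.filter_cons]
          by_cases h : r.1 ∈ S <;> simp [h]

lemma score_eq (lettervalues : List (String × Int)) (S : PySem.Set String) (hS : S.Nodup) :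
    ((lettervalues.filter (fun row => PySem.Set.contains S row.1)).map (·.2)).sum
      = (S.map (fun c =>
          (lettervalues.foldl (fun d row => d.insert row.1 (d.getD row.1 0 + row.2))
            PySem.Dict.empty).getD c 0)).sum := by
  have h1 : ∀ c ∈ S,
      (lettervalues.foldl (fun d row => d.insert row.1 (d.getD row.1 0 + row.2))
        PySem.Dict.empty).getD c 0
      = ((lettervalues.filter (fun r => r.1 == c)).map (·.2)).sum := by
    intro c _; rw [val_getD]; simp
  rw [List.map_congr_left h1, sum_perkey lettervalues S hS]
  simp [PySem.Set.contains_eq_listContains]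

-- ===== VERDICT (by name: the statement is the Claim_ definition above) =====
theorem get_wordsbyscore_spec : Claim_equal_get_wordsbyscore := by
  intro wordlist lettervalues _
  unfold Spec_get_wordsbyscore get_wordsbyscore get_wordsbyscore_alt
  simp only [List.foldl_map]
  have h : ∀ w : String,
      ((lettervalues.filter (fun row =>
          PySem.Set.contains (PySem.Set.ofList ((PySem.Str.strip w).toList.map pvStr1)) row.1)).map (·.2)).sum
        = ((PySem.Set.ofList ((PySem.Str.strip w).toList.map pvStr1)).map (fun c =>
            (lettervalues.foldl (fun d row => d.insert row.1 (d.getD row.1 0 + row.2))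
              PySem.Dict.empty).getD c 0)).sum :=
    fun w => score_eq lettervalues _ (PySem.Set.nodup_ofList _)
  simp only [h]
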